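-- pv_equiv track=rewrite | github.com/wccgoog/pass | python/is_tri.py | is_tri
-- ===== SOURCE A (Python) =====
-- def is_tri(word):
-- 	if len(word)<6:
-- 		return False
-- 	else:
-- 		for i in range(len(word)-5):
-- 			if word[i]==word[i+1] and word[i+2]==word[i+3] and word[i+4]==word[i+5]:
-- 				return True
-- 		return False
-- ===== SOURCE B (Python) =====
-- def is_tri(word):
--     # State machine over adjacent-pair equalities: maintain, per parity of the
--     # pair index, the length of the current stride-2 streak of equal pairs;
--     # three in a row at the same parity is exactly A's aabbcc window.
--     s_even = 0
--     s_odd = 0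
--     for j in range(len(word) - 1):
--         if word[j] == word[j + 1]:
--             if j % 2 == 0:
--                 s_even += 1
--                 if s_even == 3:
--                     return True
--             else:
--                 s_odd += 1
--                 if s_odd == 3:
--                     return True
--         else:
--             if j % 2 == 0:
--                 s_even = 0
--             else:
--                 s_odd = 0
--     return False
-- ===== Notes on version B (the rewrite author's own statement) =====
-- stated objective: alternative
-- what changed: B replaces A's six-character window re-checks by a one-pass state machine over single adjacent pairs: it keeps two streak counters (one per parity of the pair index), resets a counter when its pair is unequal, and returns True as soon as a counter reaches 3; no explicit len<6 guard is needed.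
import Mathlib
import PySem

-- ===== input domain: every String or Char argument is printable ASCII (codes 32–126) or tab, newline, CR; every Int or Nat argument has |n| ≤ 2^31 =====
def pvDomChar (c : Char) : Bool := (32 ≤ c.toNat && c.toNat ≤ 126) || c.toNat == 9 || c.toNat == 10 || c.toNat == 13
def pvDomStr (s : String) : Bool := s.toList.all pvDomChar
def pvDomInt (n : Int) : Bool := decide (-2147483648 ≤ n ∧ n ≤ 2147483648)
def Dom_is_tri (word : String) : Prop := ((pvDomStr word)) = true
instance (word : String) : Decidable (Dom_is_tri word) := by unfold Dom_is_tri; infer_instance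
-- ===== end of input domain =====

-- B replaces A's fused six-character window scan by a one-pass state machine
-- keeping two stride-2 streak counters (one per parity of the pair index);
-- same asymptotic cost, different algorithmic decomposition.

-- ===== PORT A =====
-- A: if len < 6 → False, else scan i in range(len-5), comparing the three
-- character pairs directly; early 'return True' ported as List.any.
-- word[j] is ported as pyGetD with a default: every index used is in range.
def is_tri (word : String) : Bool :=
  let l := word.toList
  if l.length < 6 then false
  else
    (PySem.List.pyRange 0 ((l.length : Int) - 5) 1).any (fun i =>
      (PySem.List.pyGetD l i ' ' == PySem.List.pyGetD l (i + 1) ' ') &&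
      (PySem.List.pyGetD l (i + 2) ' ' == PySem.List.pyGetD l (i + 3) ' ') &&
      (PySem.List.pyGetD l (i + 4) ' ' == PySem.List.pyGetD l (i + 5) ' '))

-- ===== PORT B =====
-- B's loop with early return, ported as structural recursion over the index
-- list range(len(word)-1); state = the two streak counters (s_even, s_odd).
-- word[j] (always in range) is ported as pyGetD with a default.
def is_tri_altLoop (l : List Char) : List Int → Int → Int → Bool
  | [], _, _ => false
  | j :: rest, sEven, sOdd =>
    if PySem.List.pyGetD l j ' ' == PySem.List.pyGetD l (j + 1) ' ' then
      if PySem.Int.mod j 2 == 0 then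
        if sEven + 1 == 3 then true else is_tri_altLoop l rest (sEven + 1) sOdd
      else
        if sOdd + 1 == 3 then true else is_tri_altLoop l rest sEven (sOdd + 1)
    else
      if PySem.Int.mod j 2 == 0 then is_tri_altLoop l rest 0 sOdd
      else is_tri_altLoop l rest sEven 0

def is_tri_alt (word : String) : Bool :=
  let l := word.toList
  is_tri_altLoop l (PySem.List.pyRange 0 ((l.length : Int) - 1) 1) 0 0

-- ===== PRECONDITION & SPEC =====
def Spec_is_tri (word : String) (out : Bool) : Prop := out = is_tri_alt word
instance (word : String) (out : Bool) : Decidable (Spec_is_tri word out) := by unfold Spec_is_tri; infer_instance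

-- ===== CLAIM (what is proved, stated in full; the proofs are below) =====
def Claim_equal_is_tri : Prop := ∀ (word : String), Dom_is_tri word → Spec_is_tri word (is_tri word)

-- ===== LEMMAS AND PROOFS =====

-- pair-equality predicate at Nat index k: word[k] == word[k+1]
def pvEb (l : List Char) (k : Nat) : Bool :=
  PySem.List.pyGetD l (k : Int) ' ' == PySem.List.pyGetD l ((k : Int) + 1) ' '

-- credit needed from the pre-loop counters for a hit t steps after the base
def pvReq (t : Nat) : Nat := if t < 2 then 2 else if t < 4 then 1 else 0

-- counter consulted at absolute index k
def pvCnt (k : Nat) (se so : Nat) : Nat := if k % 2 = 0 then se else so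

-- one step of the loop, with the Python mod replaced by the Nat parity test
theorem pvLoop_cons (l : List Char) (j : Nat) (rest : List Int) (se so : Int) :
    is_tri_altLoop l ((j : Int) :: rest) se so =
      if pvEb l j then
        if j % 2 = 0 then
          (if se + 1 = 3 then true else is_tri_altLoop l rest (se + 1) so)
        else
          (if so + 1 = 3 then true else is_tri_altLoop l rest se (so + 1))
      else
        if j % 2 = 0 then is_tri_altLoop l rest 0 so
        else is_tri_altLoop l rest se 0 := by
  have hmod : PySem.Int.mod (j : Int) 2 = ((j % 2 : Nat) : Int) := by
    exact_mod_cast PySem.Int.mod_natCast j 2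
  simp only [is_tri_altLoop, pvEb, hmod]
  by_cases hp : j % 2 = 0
  · simp [hp]
  · have h1 : j % 2 = 1 := by omega
    simp [h1]

theorem pvLoop_inv (l : List Char) :
    ∀ (m j : Nat) (se so : Nat), se ≤ 2 → so ≤ 2 →
    (is_tri_altLoop l (List.map (fun (k : Nat) => ((k : Nat) : Int)) (List.range' j m)) (se : Int) (so : Int) = true ↔
      ∃ t, t < m ∧ pvEb l (j + t) = true ∧
        (2 ≤ t → pvEb l (j + t - 2) = true) ∧
        (4 ≤ t → pvEb l (j + t - 4) = true) ∧
        pvReq t ≤ pvCnt (j + t) se so) := by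
  intro m
  induction m with
  | zero =>
    intro j se so _ _
    simp [is_tri_altLoop]
  | succ m ih =>
    intro j se so hse hso
    rw [List.range'_succ, List.map_cons, pvLoop_cons]
    by_cases hE : pvEb l j = true
    · rw [if_pos hE]
      by_cases hpar : j % 2 = 0
      · rw [if_pos hpar]
        by_cases hfull : se = 2
        · rw [if_pos (by omega : (se : Int) + 1 = 3)]
          constructor
          · intro _
            refine ⟨0, by omega, by simpa using hE, by omega, by omega, ?_⟩
            simp [pvReq, pvCnt, hpar, hfull]
          · intro _; rfl
        · rw [if_neg (by omega : ¬ ((se : Int) + 1 = 3))]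
          have hrec := ih (j + 1) (se + 1) so (by omega) hso
          push_cast at hrec
          rw [hrec]
          clear hrec
          constructor
          · rintro ⟨t, ht, h0, h2, h4, hc⟩
            refine ⟨t + 1, by omega, by simpa [Nat.add_assoc, Nat.add_comm 1 t] using h0, ?_, ?_, ?_⟩
            · intro h2'
              rcases Nat.lt_or_ge t 2 with h | h
              · have ht1 : t = 1 := by omega
                subst ht1
                have he : j + (1 + 1) - 2 = j := by omega
                rw [he]; exact hE
              · have he : j + (t + 1) - 2 = (j + 1) + t - 2 := by omega
                rw [he]; exact h2 (by omega)
            · intro h4'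
              rcases Nat.lt_or_ge t 4 with h | h
              · have ht3 : t = 3 := by omega
                subst ht3
                have he : j + (3 + 1) - 4 = j := by omega
                rw [he]; exact hE
              · have he : j + (t + 1) - 4 = (j + 1) + t - 4 := by omega
                rw [he]; exact h4 (by omega)
            · have hk : j + (t + 1) = (j + 1) + t := by omega
              rw [hk]
              unfold pvCnt pvReq at hc ⊢
              split_ifs at hc ⊢ <;> omega
          · rintro ⟨t, ht, h0, h2, h4, hc⟩
            rcases Nat.eq_zero_or_pos t with rfl | htpos
            · exfalso
              have e2 : pvCnt (j + 0) se so = se := by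
                unfold pvCnt
                rw [if_pos (by omega : (j + 0) % 2 = 0)]
              have hcc : pvReq 0 ≤ se := by rw [e2] at hc; exact hc
              have hcc2 : 2 ≤ se := by
                have e1 : pvReq 0 = 2 := rfl
                rw [e1] at hcc; exact hcc
              exact hfull (Nat.le_antisymm hse hcc2)
            · obtain ⟨t', rfl⟩ : ∃ t', t = t' + 1 := ⟨t - 1, by omega⟩
              refine ⟨t', by omega, by simpa [Nat.add_assoc, Nat.add_comm 1 t'] using h0, ?_, ?_, ?_⟩
              · intro h2'
                have he : (j + 1) + t' - 2 = j + (t' + 1) - 2 := by omega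
                rw [he]; exact h2 (by omega)
              · intro h4'
                have he : (j + 1) + t' - 4 = j + (t' + 1) - 4 := by omega
                rw [he]; exact h4 (by omega)
              · have hk : (j + 1) + t' = j + (t' + 1) := by omega
                rw [hk]
                unfold pvCnt pvReq at hc ⊢
                split_ifs at hc ⊢ <;> omega
      · rw [if_neg hpar]
        by_cases hfull : so = 2
        · rw [if_pos (by omega : (so : Int) + 1 = 3)]
          constructor
          · intro _
            refine ⟨0, by omega, by simpa using hE, by omega, by omega, ?_⟩
            simp [pvReq, pvCnt, hpar, hfull]
          · intro _; rfl
        · rw [if_neg (by omega : ¬ ((so : Int) + 1 = 3))]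
          have hrec := ih (j + 1) se (so + 1) hse (by omega)
          push_cast at hrec
          rw [hrec]
          clear hrec
          constructor
          · rintro ⟨t, ht, h0, h2, h4, hc⟩
            refine ⟨t + 1, by omega, by simpa [Nat.add_assoc, Nat.add_comm 1 t] using h0, ?_, ?_, ?_⟩
            · intro h2'
              rcases Nat.lt_or_ge t 2 with h | h
              · have ht1 : t = 1 := by omega
                subst ht1
                have he : j + (1 + 1) - 2 = j := by omega
                rw [he]; exact hE
              · have he : j + (t + 1) - 2 = (j + 1) + t - 2 := by omega
                rw [he]; exact h2 (by omega)
            · intro h4'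
              rcases Nat.lt_or_ge t 4 with h | h
              · have ht3 : t = 3 := by omega
                subst ht3
                have he : j + (3 + 1) - 4 = j := by omega
                rw [he]; exact hE
              · have he : j + (t + 1) - 4 = (j + 1) + t - 4 := by omega
                rw [he]; exact h4 (by omega)
            · have hk : j + (t + 1) = (j + 1) + t := by omega
              rw [hk]
              unfold pvCnt pvReq at hc ⊢
              split_ifs at hc ⊢ <;> omega
          · rintro ⟨t, ht, h0, h2, h4, hc⟩
            rcases Nat.eq_zero_or_pos t with rfl | htpos
            · exfalso
              have e2 : pvCnt (j + 0) se so = so := by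
                unfold pvCnt
                rw [if_neg (by omega : ¬ (j + 0) % 2 = 0)]
              have hcc : pvReq 0 ≤ so := by rw [e2] at hc; exact hc
              have hcc2 : 2 ≤ so := by
                have e1 : pvReq 0 = 2 := rfl
                rw [e1] at hcc; exact hcc
              exact hfull (Nat.le_antisymm hso hcc2)
            · obtain ⟨t', rfl⟩ : ∃ t', t = t' + 1 := ⟨t - 1, by omega⟩
              refine ⟨t', by omega, by simpa [Nat.add_assoc, Nat.add_comm 1 t'] using h0, ?_, ?_, ?_⟩
              · intro h2'
                have he : (j + 1) + t' - 2 = j + (t' + 1) - 2 := by omega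
                rw [he]; exact h2 (by omega)
              · intro h4'
                have he : (j + 1) + t' - 4 = j + (t' + 1) - 4 := by omega
                rw [he]; exact h4 (by omega)
              · have hk : (j + 1) + t' = j + (t' + 1) := by omega
                rw [hk]
                unfold pvCnt pvReq at hc ⊢
                split_ifs at hc ⊢ <;> omega
    · have hE' : pvEb l j = false := by simpa using hE
      rw [if_neg (by simp [hE'])]
      by_cases hpar : j % 2 = 0
      · rw [if_pos hpar]
        have hrec := ih (j + 1) 0 so (by omega) hso
        push_cast at hrec
        rw [hrec]
        clear hrec
        constructor
        · rintro ⟨t, ht, h0, h2, h4, hc⟩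
          refine ⟨t + 1, by omega, by simpa [Nat.add_assoc, Nat.add_comm 1 t] using h0, ?_, ?_, ?_⟩
          · intro h2'
            rcases Nat.lt_or_ge t 2 with h | h
            · exfalso
              have ht1 : t = 1 := by omega
              subst ht1
              unfold pvCnt pvReq at hc
              split_ifs at hc <;> omega
            · have he : j + (t + 1) - 2 = (j + 1) + t - 2 := by omega
              rw [he]; exact h2 (by omega)
          · intro h4'
            rcases Nat.lt_or_ge t 4 with h | h
            · exfalso
              have ht3 : t = 3 := by omega
              subst ht3
              unfold pvCnt pvReq at hc
              split_ifs at hc <;> omega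
            · have he : j + (t + 1) - 4 = (j + 1) + t - 4 := by omega
              rw [he]; exact h4 (by omega)
          · have hk : j + (t + 1) = (j + 1) + t := by omega
            rw [hk]
            unfold pvCnt pvReq at hc ⊢
            split_ifs at hc ⊢ <;> omega
        · rintro ⟨t, ht, h0, h2, h4, hc⟩
          rcases Nat.eq_zero_or_pos t with rfl | htpos
          · exfalso; rw [Nat.add_zero] at h0; rw [h0] at hE'; exact absurd hE' (by simp)
          · obtain ⟨t', rfl⟩ : ∃ t', t = t' + 1 := ⟨t - 1, by omega⟩
            refine ⟨t', by omega, by simpa [Nat.add_assoc, Nat.add_comm 1 t'] using h0, ?_, ?_, ?_⟩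
            · intro h2'
              have he : (j + 1) + t' - 2 = j + (t' + 1) - 2 := by omega
              rw [he]; exact h2 (by omega)
            · intro h4'
              have he : (j + 1) + t' - 4 = j + (t' + 1) - 4 := by omega
              rw [he]; exact h4 (by omega)
            · have hk : (j + 1) + t' = j + (t' + 1) := by omega
              rw [hk]
              rcases Nat.lt_or_ge t' 2 with h | h
              · by_cases hpp : (j + (t' + 1)) % 2 = 0
                · exfalso
                  have hh := h2 (by omega)
                  have he : j + (t' + 1) - 2 = j := by omega
                  rw [he] at hh
                  rw [hh] at hE'; exact absurd hE' (by simp)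
                · unfold pvCnt pvReq at hc ⊢
                  split_ifs at hc ⊢ <;> omega
              · rcases Nat.lt_or_ge t' 4 with h' | h'
                · by_cases hpp : (j + (t' + 1)) % 2 = 0
                  · exfalso
                    have hh := h4 (by omega)
                    have he : j + (t' + 1) - 4 = j := by omega
                    rw [he] at hh
                    rw [hh] at hE'; exact absurd hE' (by simp)
                  · unfold pvCnt pvReq at hc ⊢
                    split_ifs at hc ⊢ <;> omega
                · unfold pvCnt pvReq at hc ⊢
                  split_ifs at hc ⊢ <;> omega
      · rw [if_neg hpar]
        have hrec := ih (j + 1) se 0 hse (by omega)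
        push_cast at hrec
        rw [hrec]
        clear hrec
        constructor
        · rintro ⟨t, ht, h0, h2, h4, hc⟩
          refine ⟨t + 1, by omega, by simpa [Nat.add_assoc, Nat.add_comm 1 t] using h0, ?_, ?_, ?_⟩
          · intro h2'
            rcases Nat.lt_or_ge t 2 with h | h
            · exfalso
              have ht1 : t = 1 := by omega
              subst ht1
              unfold pvCnt pvReq at hc
              split_ifs at hc <;> omega
            · have he : j + (t + 1) - 2 = (j + 1) + t - 2 := by omega
              rw [he]; exact h2 (by omega)
          · intro h4'
            rcases Nat.lt_or_ge t 4 with h | h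
            · exfalso
              have ht3 : t = 3 := by omega
              subst ht3
              unfold pvCnt pvReq at hc
              split_ifs at hc <;> omega
            · have he : j + (t + 1) - 4 = (j + 1) + t - 4 := by omega
              rw [he]; exact h4 (by omega)
          · have hk : j + (t + 1) = (j + 1) + t := by omega
            rw [hk]
            unfold pvCnt pvReq at hc ⊢
            split_ifs at hc ⊢ <;> omega
        · rintro ⟨t, ht, h0, h2, h4, hc⟩
          rcases Nat.eq_zero_or_pos t with rfl | htpos
          · exfalso; rw [Nat.add_zero] at h0; rw [h0] at hE'; exact absurd hE' (by simp)
          · obtain ⟨t', rfl⟩ : ∃ t', t = t' + 1 := ⟨t - 1, by omega⟩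
            refine ⟨t', by omega, by simpa [Nat.add_assoc, Nat.add_comm 1 t'] using h0, ?_, ?_, ?_⟩
            · intro h2'
              have he : (j + 1) + t' - 2 = j + (t' + 1) - 2 := by omega
              rw [he]; exact h2 (by omega)
            · intro h4'
              have he : (j + 1) + t' - 4 = j + (t' + 1) - 4 := by omega
              rw [he]; exact h4 (by omega)
            · have hk : (j + 1) + t' = j + (t' + 1) := by omega
              rw [hk]
              rcases Nat.lt_or_ge t' 2 with h | h
              · by_cases hpp : (j + (t' + 1)) % 2 = 1
                · exfalso
                  have hh := h2 (by omega)
                  have he : j + (t' + 1) - 2 = j := by omega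
                  rw [he] at hh
                  rw [hh] at hE'; exact absurd hE' (by simp)
                · unfold pvCnt pvReq at hc ⊢
                  split_ifs at hc ⊢ <;> omega
              · rcases Nat.lt_or_ge t' 4 with h' | h'
                · by_cases hpp : (j + (t' + 1)) % 2 = 1
                  · exfalso
                    have hh := h4 (by omega)
                    have he : j + (t' + 1) - 4 = j := by omega
                    rw [he] at hh
                    rw [hh] at hE'; exact absurd hE' (by simp)
                  · unfold pvCnt pvReq at hc ⊢
                    split_ifs at hc ⊢ <;> omega
                · unfold pvCnt pvReq at hc ⊢
                  split_ifs at hc ⊢ <;> omega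

-- B's result as an existential over Nat indices
theorem is_tri_alt_iff (word : String) :
    is_tri_alt word = true ↔
      ∃ t, t < (word.toList.length - 1) ∧ 4 ≤ t ∧ pvEb word.toList t = true ∧
        pvEb word.toList (t - 2) = true ∧ pvEb word.toList (t - 4) = true := by
  unfold is_tri_alt
  have hr : PySem.List.pyRange 0 ((word.toList.length : Int) - 1) 1 =
      List.map (fun (k : Nat) => ((k : Nat) : Int)) (List.range' 0 (word.toList.length - 1)) := by
    rw [PySem.List.pyRange_one]
    have ht : ((word.toList.length : Int) - 1 - 0).toNat = word.toList.length - 1 := by omega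
    rw [ht, ← List.range_eq_range']
    simp
  simp only [hr]
  have hinv := pvLoop_inv word.toList (word.toList.length - 1) 0 0 0 (by omega) (by omega)
  simp only [Nat.cast_zero] at hinv
  rw [hinv]
  constructor
  · rintro ⟨t, ht, h0, h2, h4, hc⟩
    have ht4 : 4 ≤ t := by
      unfold pvCnt pvReq at hc
      split_ifs at hc <;> omega
    exact ⟨t, by simpa using ht, ht4, by simpa using h0,
      by simpa using h2 (by omega), by simpa using h4 (by omega)⟩
  · rintro ⟨t, ht, ht4, h0, h2, h4⟩
    refine ⟨t, by simpa using ht, by simpa using h0,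
      fun _ => by simpa using h2, fun _ => by simpa using h4, ?_⟩
    unfold pvReq
    rw [if_neg (by omega : ¬ t < 2), if_neg (by omega : ¬ t < 4)]
    exact Nat.zero_le _

-- A's result as the same existential
theorem is_tri_iff (word : String) :
    is_tri word = true ↔
      ∃ t, t < (word.toList.length - 1) ∧ 4 ≤ t ∧ pvEb word.toList t = true ∧
        pvEb word.toList (t - 2) = true ∧ pvEb word.toList (t - 4) = true := by
  unfold is_tri
  set l := word.toList with hl
  by_cases hlen : l.length < 6
  · simp only [if_pos hlen]
    constructor
    · intro h; exact absurd h (by simp)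
    · rintro ⟨t, ht, ht4, _⟩; omega
  · simp only [if_neg hlen]
    rw [List.any_eq_true]
    constructor
    · rintro ⟨i, hi, hp⟩
      rw [PySem.List.mem_pyRange_one] at hi
      simp only [Bool.and_eq_true, beq_iff_eq] at hp
      refine ⟨(i + 4).toNat, by omega, by omega, ?_, ?_, ?_⟩
      · simp only [pvEb, beq_iff_eq]
        have h1 : (((i + 4).toNat : Nat) : Int) = i + 4 := by omega
        rw [h1]
        have h2 : i + 4 + 1 = i + 5 := by ring
        rw [h2]; exact hp.2
      · simp only [pvEb, beq_iff_eq]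
        have h1 : (((i + 4).toNat - 2 : Nat) : Int) = i + 2 := by omega
        rw [h1]
        have h2 : i + 2 + 1 = i + 3 := by ring
        rw [h2]; exact hp.1.2
      · simp only [pvEb, beq_iff_eq]
        have h1 : (((i + 4).toNat - 4 : Nat) : Int) = i := by omega
        rw [h1]
        exact hp.1.1
    · rintro ⟨t, ht, ht4, h0, h2, h4⟩
      refine ⟨(t : Int) - 4, ?_, ?_⟩
      · rw [PySem.List.mem_pyRange_one]; omega
      · simp only [Bool.and_eq_true, beq_iff_eq]
        simp only [pvEb, beq_iff_eq] at h0 h2 h4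
        refine ⟨⟨?_, ?_⟩, ?_⟩
        · have h1 : (t : Int) - 4 = ((t - 4 : Nat) : Int) := by omega
          rw [h1]; exact h4
        · have h1 : (t : Int) - 4 + 2 = ((t - 2 : Nat) : Int) := by omega
          have h1' : (t : Int) - 4 + 3 = ((t - 2 : Nat) : Int) + 1 := by omega
          rw [h1, h1']; exact h2
        · have h1 : (t : Int) - 4 + 4 = ((t : Nat) : Int) := by omega
          have h1' : (t : Int) - 4 + 5 = ((t : Nat) : Int) + 1 := by omega
          rw [h1, h1']; exact h0

-- ===== VERDICT (by name: the statement is the Claim_ definition above) =====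
theorem is_tri_spec : Claim_equal_is_tri := by
  intro word _
  unfold Spec_is_tri
  by_cases h : is_tri word = true
  · rw [h]
    exact ((is_tri_alt_iff word).mpr ((is_tri_iff word).mp h)).symm
  · have h1 : is_tri word = false := by simpa using h
    have h2 : is_tri_alt word = false := by
      by_contra hc
      have hc' : is_tri_alt word = true := by simpa using hc
      exact h ((is_tri_iff word).mpr ((is_tri_alt_iff word).mp hc'))
    rw [h1, h2]
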